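-- pv_equiv track=rewrite | github.com/sbmlteam/deviser | generator/legacy/strFunctions.py | cleanStr
-- ===== SOURCE A (Python) =====
-- def cleanStr(word):
--   final = ''
--   i = 0
--   while i < len(word):
--     current = word[i]
--     if current == '-':
--       if i+1 < len(word) and word[i+1] != '-':
--         final = final + word[i+1].upper()
--         i = i+1
--     else:
--       final = final + word[i]
--     i = i+1
--   return final
-- ===== SOURCE B (Python) =====
-- def cleanStr(word):
--   parts = word.split('-')
--   return parts[0] + ''.join(p[:1].upper() + p[1:] for p in parts[1:])
-- ===== Notes on version B (the rewrite author's own statement) =====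
-- stated objective: faster
-- what changed: Replaced the index-skipping while-loop character scan (with quadratic string concatenation) by a single split-on-'-' pass: split into segments, keep the first verbatim, uppercase the first character of every later segment, and join.
import Mathlib
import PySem

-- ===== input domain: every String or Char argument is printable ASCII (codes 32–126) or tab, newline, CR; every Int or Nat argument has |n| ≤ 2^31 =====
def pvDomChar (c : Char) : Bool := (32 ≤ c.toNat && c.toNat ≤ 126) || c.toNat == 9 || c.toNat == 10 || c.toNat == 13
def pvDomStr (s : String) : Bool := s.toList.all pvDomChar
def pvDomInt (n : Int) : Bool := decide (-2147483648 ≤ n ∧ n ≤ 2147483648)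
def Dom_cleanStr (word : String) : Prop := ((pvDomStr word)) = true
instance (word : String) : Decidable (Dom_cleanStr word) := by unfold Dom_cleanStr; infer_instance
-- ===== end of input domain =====

-- B replaces A's index-skipping character scan by a split-on-'-' / capitalise-later-segments / join pass (objective: simpler).

-- ===== PORT A =====
-- A's while loop over index i, carried as structural recursion over the remaining suffix
-- with the accumulated `final` as first argument (same state, same branch order).
def cleanStrLoop : List Char → List Char → List Char
  | final, [] => final
  | final, c :: rest =>
    if c = '-' then
      match rest with
      | [] => final                             -- i+1 ≥ len: nothing appended, loop ends
      | d :: rest' =>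
        if d ≠ '-' then cleanStrLoop (final ++ [PySem.Chars.upperChar d]) rest'   -- append word[i+1].upper(), i += 2
        else cleanStrLoop final (d :: rest')    -- next is also '-': just i += 1
    else cleanStrLoop (final ++ [c]) rest       -- append word[i], i += 1

def cleanStr (word : String) : String :=
  String.ofList (cleanStrLoop [] word.toList)

-- ===== PORT B =====
-- p[:1].upper() + p[1:]
def capSeg (p : List Char) : List Char :=
  PySem.Chars.upper (PySem.Chars.slice p none (some 1)) ++ PySem.Chars.slice p (some 1) none

def cleanStr_alt (word : String) : String :=
  let parts := word.toList.splitOn '-'                             -- word.split('-')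
  String.ofList (PySem.List.pyGetD parts 0 [] ++                   -- parts[0] +
    PySem.Chars.join [] ((parts.drop 1).map capSeg))               -- ''.join(cap over parts[1:])

-- ===== PRECONDITION & SPEC =====
def Spec_cleanStr (word : String) (out : String) : Prop := out = cleanStr_alt word
instance (word : String) (out : String) : Decidable (Spec_cleanStr word out) := by unfold Spec_cleanStr; infer_instance

-- ===== CLAIM (what is proved, stated in full; the proofs are below) =====
def Claim_equal_cleanStr : Prop := ∀ (word : String), Dom_cleanStr word → Spec_cleanStr word (cleanStr word)

-- ===== LEMMAS AND PROOFS =====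

-- accumulator form of A's loop
theorem cleanStrLoop_append : ∀ n, ∀ (final cs : List Char), cs.length ≤ n →
    cleanStrLoop final cs = final ++ cleanStrLoop [] cs := by
  intro n
  induction n with
  | zero =>
    intro final cs h
    have : cs = [] := List.eq_nil_of_length_eq_zero (Nat.le_zero.mp h)
    subst this; simp [cleanStrLoop]
  | succ n ih =>
    intro final cs h
    match cs with
    | [] => simp [cleanStrLoop]
    | c :: rest =>
      by_cases hc : c = '-'
      · subst hc
        match rest with
        | [] =>
          rw [cleanStrLoop.eq_def, cleanStrLoop.eq_def ([])]; simp
        | d :: rest' =>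
          by_cases hd : d = '-'
          · subst hd
            rw [cleanStrLoop.eq_def, cleanStrLoop.eq_def ([])]
            simp only [if_pos rfl, ne_eq, not_true_eq_false, ite_false]
            exact ih final ('-' :: rest') (by simpa using h)
          · rw [cleanStrLoop.eq_def, cleanStrLoop.eq_def ([])]
            simp only [if_pos rfl, ne_eq, hd, not_false_eq_true, ite_true]
            rw [ih (final ++ [PySem.Chars.upperChar d]) rest' (by simp at h; omega),
                ih ([] ++ [PySem.Chars.upperChar d]) rest' (by simp at h; omega)]
            simp
      · rw [cleanStrLoop.eq_def, cleanStrLoop.eq_def ([])]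
        simp only [if_neg hc]
        rw [ih (final ++ [c]) rest (by simpa using h),
            ih ([] ++ [c]) rest (by simpa using h)]
        simp

theorem join_nil_eq_flatten (p : List (List Char)) : PySem.Chars.join [] p = p.flatten := by
  induction p with
  | nil => simp [PySem.Chars.join_nil]
  | cons h t ih =>
    cases t with
    | nil => simp [PySem.Chars.join_singleton]
    | cons b t' => simp [PySem.Chars.join_cons_cons] at *; simp [ih]

theorem capSeg_nil : capSeg [] = [] := by decide

theorem capSeg_cons (d : Char) (h : List Char) :
    capSeg (d :: h) = PySem.Chars.upperChar d :: h := by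
  simp [capSeg, pysem, PySem.Chars.upper]

-- B's value on the char list, and the "all segments capitalised" variant
def bVal (cs : List Char) : List Char :=
  (cs.splitOn '-').headD [] ++ (((cs.splitOn '-').drop 1).map capSeg).flatten

def bCap (cs : List Char) : List Char :=
  ((cs.splitOn '-').map capSeg).flatten

theorem splitOn_ne_nil (cs : List Char) : cs.splitOn '-' ≠ [] := by
  simp [List.splitOn, List.splitOnP_ne_nil]

theorem bVal_cons_ne (c : Char) (cs : List Char) (hc : ¬ c = '-') :
    bVal (c :: cs) = c :: bVal cs := by
  unfold bVal
  simp only [List.splitOn, List.splitOnP_cons]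
  rw [if_neg (by simpa using hc)]
  rcases h : List.splitOnP (fun x => x == '-') cs with _ | ⟨hd, tl⟩
  · exact absurd h (by simpa [List.splitOn] using splitOn_ne_nil cs)
  · simp

theorem bVal_cons_dash (cs : List Char) : bVal ('-' :: cs) = bCap cs := by
  unfold bVal bCap
  simp [List.splitOn, List.splitOnP_cons, capSeg_nil]

theorem bCap_cons_dash (cs : List Char) : bCap ('-' :: cs) = bCap cs := by
  unfold bCap
  simp [List.splitOn, List.splitOnP_cons, capSeg_nil]

theorem bCap_cons_ne (c : Char) (cs : List Char) (hc : ¬ c = '-') :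
    bCap (c :: cs) = PySem.Chars.upperChar c :: bVal cs := by
  unfold bCap bVal
  simp only [List.splitOn, List.splitOnP_cons]
  rw [if_neg (by simpa using hc)]
  rcases h : List.splitOnP (fun x => x == '-') cs with _ | ⟨hd, tl⟩
  · exact absurd h (by simpa [List.splitOn] using splitOn_ne_nil cs)
  · simp [capSeg_cons]

-- main list-level equivalence, strong induction on length
theorem loop_eq_bVal : ∀ n (cs : List Char), cs.length ≤ n →
    (cleanStrLoop [] cs = bVal cs ∧ cleanStrLoop [] ('-' :: cs) = bCap cs) := by
  intro n
  induction n with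
  | zero =>
    intro cs h
    have : cs = [] := List.eq_nil_of_length_eq_zero (Nat.le_zero.mp h)
    subst this
    exact ⟨rfl, rfl⟩
  | succ n ih =>
    intro cs h
    constructor
    · cases cs with
      | nil => rfl
      | cons c rest =>
        by_cases hc : c = '-'
        · subst hc
          rw [bVal_cons_dash]
          exact (ih rest (by simpa using h)).2
        · rw [bVal_cons_ne c rest hc]
          rw [show cleanStrLoop [] (c :: rest) = cleanStrLoop ([] ++ [c]) rest from by
            rw [cleanStrLoop.eq_def]; simp [hc]]
          rw [cleanStrLoop_append rest.length _ rest le_rfl]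
          rw [(ih rest (by simpa using h)).1]
          simp
    · cases cs with
      | nil => rfl
      | cons d rest =>
        by_cases hd : d = '-'
        · subst hd
          rw [bCap_cons_dash]
          rw [show cleanStrLoop [] ('-' :: '-' :: rest) = cleanStrLoop [] ('-' :: rest) from by
            rw [cleanStrLoop.eq_def]; simp]
          exact (ih rest (by simpa using h)).2
        · rw [bCap_cons_ne d rest hd]
          rw [show cleanStrLoop [] ('-' :: d :: rest)
              = cleanStrLoop ([] ++ [PySem.Chars.upperChar d]) rest from by
            rw [cleanStrLoop.eq_def]; simp [hd]]
          rw [cleanStrLoop_append rest.length _ rest le_rfl]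
          rw [(ih rest (by simpa using h)).1]
          simp

-- ===== VERDICT (by name: the statement is the Claim_ definition above) =====
theorem cleanStr_spec : Claim_equal_cleanStr := by
  intro word _
  unfold Spec_cleanStr cleanStr cleanStr_alt
  have h := (loop_eq_bVal word.toList.length word.toList le_rfl).1
  rw [h]
  unfold bVal
  simp only [join_nil_eq_flatten, PySem.List.pyGetD_zero]
  rcases hs : word.toList.splitOn '-' with _ | ⟨hd, tl⟩
  · exact absurd hs (splitOn_ne_nil _)
  · simp
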